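-- pv_equiv track=rewrite | github.com/esaul314/chunkify | pdf_chunker/passes/emit_jsonl_lists.py | list_intro_start
-- ===== SOURCE A (Python) =====
-- def list_intro_start(text: str) -> int:
--     """Return the index where a trailing list introduction begins."""
--     return max(
--         (
--             pos + span
--             for token, span in (("\n\n", 2), (". ", 2), ("! ", 2), ("? ", 2))
--             if (pos := text.rfind(token)) != -1
--         ),
--         default=-1,
--     )
-- ===== SOURCE B (Python) =====
-- def list_intro_start(text: str) -> int:
--     """Return the index where a trailing list introduction begins."""
--     seps = ("\n\n", ". ", "! ", "? ")
--     for i in range(len(text) - 2, -1, -1):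
--         if text[i:i + 2] in seps:
--             return i + 2
--     return -1
-- ===== Notes on version B (the rewrite author's own statement) =====
-- stated objective: alternative
-- what changed: B replaces A's four independent rfind scans plus max-with-default by a single backward loop that returns i+2 at the first position i (scanning from the end) where text[i:i+2] is one of the four separators, and -1 if the loop finishes.
import Mathlib
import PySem

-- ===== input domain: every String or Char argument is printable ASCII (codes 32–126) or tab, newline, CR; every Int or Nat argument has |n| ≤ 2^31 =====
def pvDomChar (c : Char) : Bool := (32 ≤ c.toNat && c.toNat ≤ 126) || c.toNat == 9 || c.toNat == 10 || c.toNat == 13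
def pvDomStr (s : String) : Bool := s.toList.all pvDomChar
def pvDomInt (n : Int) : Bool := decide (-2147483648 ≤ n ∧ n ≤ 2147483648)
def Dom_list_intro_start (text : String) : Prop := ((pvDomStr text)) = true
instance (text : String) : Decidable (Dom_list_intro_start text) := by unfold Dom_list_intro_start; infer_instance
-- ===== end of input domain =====

-- B replaces the four independent rfind scans with one backward scan that returns at the first separator found (alternative decomposition, same cost).


-- ===== PORT A =====
def list_intro_start (text : String) : Int :=
  let cands := [("\n\n", (2 : Int)), (". ", 2), ("! ", 2), ("? ", 2)].filterMap
    (fun p => let pos := PySem.Str.rfind text p.1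
              if pos ≠ -1 then some (pos + p.2) else none)
  (PySem.List.max? cands (fun x => x)).getD (-1)

-- ===== PORT B =====
-- text[i:i+2] in ("\n\n", ". ", "! ", "? ")
def altSepAt (cs : List Char) (i : Nat) : Bool :=
  [['\n', '\n'], ['.', ' '], ['!', ' '], ['?', ' ']].contains
    (PySem.List.slice cs (some (i : Int)) (some ((i : Int) + 2)))

-- the loop 'for i in range(len(text)-2, -1, -1)', counting down
def altGo (cs : List Char) : Nat → Int
  | 0 => if altSepAt cs 0 then 2 else -1
  | i + 1 => if altSepAt cs (i + 1) then ((i : Int) + 1) + 2 else altGo cs i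

def list_intro_start_alt (text : String) : Int :=
  let cs := text.toList
  if cs.length < 2 then -1 else altGo cs (cs.length - 2)

-- ===== PRECONDITION & SPEC =====
def Spec_list_intro_start (text : String) (out : Int) : Prop := out = list_intro_start_alt text
instance (text : String) (out : Int) : Decidable (Spec_list_intro_start text out) := by unfold Spec_list_intro_start; infer_instance

-- ===== CLAIM (what is proved, stated in full; the proofs are below) =====
def Claim_equal_list_intro_start : Prop := ∀ (text : String), Dom_list_intro_start text → Spec_list_intro_start text (list_intro_start text)

-- ===== LEMMAS AND PROOFS =====

-- candidate value of one token scanned down to position i: rfind-so-far, +2 if found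
def hCand (cs : List Char) (tok : List Char) (i : Nat) : Int :=
  if PySem.Chars.rfind.go cs tok i = -1 then -1 else PySem.Chars.rfind.go cs tok i + 2

theorem go_zero (cs tok : List Char) :
    PySem.Chars.rfind.go cs tok 0 = if tok.isPrefixOf cs then 0 else -1 := by
  simp [PySem.Chars.rfind.go]

theorem go_succ (cs tok : List Char) (i : Nat) :
    PySem.Chars.rfind.go cs tok (i + 1) =
      if tok.isPrefixOf (cs.drop (i + 1)) then ((i : Int) + 1) else PySem.Chars.rfind.go cs tok i := by
  simp [PySem.Chars.rfind.go]

theorem go_le (cs tok : List Char) (i : Nat) : PySem.Chars.rfind.go cs tok i ≤ i := by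
  induction i with
  | zero => rw [go_zero]; split <;> simp
  | succ n ih => rw [go_succ]; split <;> push_cast <;> omega

theorem neg_one_le_go (cs tok : List Char) (i : Nat) : -1 ≤ PySem.Chars.rfind.go cs tok i := by
  induction i with
  | zero => rw [go_zero]; split <;> simp
  | succ n ih => rw [go_succ]; split <;> omega

theorem hCand_bounds (cs tok : List Char) (i : Nat) :
    -1 ≤ hCand cs tok i ∧ hCand cs tok i ≤ (i : Int) + 2 := by
  unfold hCand
  have h1 := go_le cs tok i
  have h2 := neg_one_le_go cs tok i
  split <;> omega

theorem prefix_short (tok l : List Char) (h2 : tok.length = 2) (hl : l.length < 2) :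
    tok.isPrefixOf l = false := by
  rw [Bool.eq_false_iff]
  intro h
  have hp := (List.isPrefixOf_iff_prefix.mp h).length_le
  omega

theorem hCand_succ (cs tok : List Char) (i : Nat) :
    hCand cs tok (i + 1) =
      if tok.isPrefixOf (cs.drop (i + 1)) then ((i : Int) + 1) + 2 else hCand cs tok i := by
  unfold hCand
  rw [go_succ]
  split <;> simp <;> omega

theorem sepAt_eq (cs : List Char) (i : Nat) :
    altSepAt cs i = (List.isPrefixOf ['\n', '\n'] (cs.drop i) || List.isPrefixOf ['.', ' '] (cs.drop i)
      || List.isPrefixOf ['!', ' '] (cs.drop i) || List.isPrefixOf ['?', ' '] (cs.drop i)) := by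
  have hs : PySem.List.slice cs (some (i : Int)) (some ((i : Int) + 2)) = (cs.drop i).take 2 := by
    have := PySem.List.slice_natCast_add cs i 2
    simpa using this
  have key : ∀ tok : List Char, tok.length = 2 →
      ((cs.drop i).take 2 = tok ↔ tok.isPrefixOf (cs.drop i) = true) := by
    intro tok hlen
    rw [List.isPrefixOf_iff_prefix, List.prefix_iff_eq_take, hlen]
    exact ⟨fun h => h.symm, fun h => h.symm⟩
  rw [Bool.eq_iff_iff]
  simp only [altSepAt, hs, List.contains_eq_mem, List.mem_cons, List.not_mem_nil, or_false,
    decide_eq_true_eq, Bool.or_eq_true]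
  rw [key ['\n', '\n'] rfl, key ['.', ' '] rfl, key ['!', ' '] rfl, key ['?', ' '] rfl]
  tauto

-- the combined A-side value scanned down to position i
def aMax (cs : List Char) (i : Nat) : Int :=
  max (max (max (max (-1) (hCand cs ['\n', '\n'] i)) (hCand cs ['.', ' '] i))
    (hCand cs ['!', ' '] i)) (hCand cs ['?', ' '] i)

theorem altGo_eq_aMax (cs : List Char) (i : Nat) : altGo cs i = aMax cs i := by
  induction i with
  | zero =>
    unfold altGo aMax hCand
    rw [sepAt_eq]
    simp only [List.drop_zero, go_zero]
    split_ifs <;> simp_all <;> omega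
  | succ n ih =>
    have b1 := hCand_bounds cs ['\n', '\n'] n
    have b2 := hCand_bounds cs ['.', ' '] n
    have b3 := hCand_bounds cs ['!', ' '] n
    have b4 := hCand_bounds cs ['?', ' '] n
    unfold altGo aMax
    rw [sepAt_eq]
    simp only [hCand_succ]
    rw [ih]
    unfold aMax
    split_ifs <;> simp_all <;> omega

-- A's expression equals the max tree over the four candidates at the full length
set_option maxHeartbeats 2000000 in
theorem listA_eq_aMax (text : String) :
    list_intro_start text = aMax text.toList text.toList.length := by
  have e1 : PySem.Str.rfind text "\n\n" =
      PySem.Chars.rfind.go text.toList ['\n', '\n'] text.toList.length := rfl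
  have e2 : PySem.Str.rfind text ". " =
      PySem.Chars.rfind.go text.toList ['.', ' '] text.toList.length := rfl
  have e3 : PySem.Str.rfind text "! " =
      PySem.Chars.rfind.go text.toList ['!', ' '] text.toList.length := rfl
  have e4 : PySem.Str.rfind text "? " =
      PySem.Chars.rfind.go text.toList ['?', ' '] text.toList.length := rfl
  have n1 := neg_one_le_go text.toList ['\n', '\n'] text.toList.length
  have n2 := neg_one_le_go text.toList ['.', ' '] text.toList.length
  have n3 := neg_one_le_go text.toList ['!', ' '] text.toList.length
  have n4 := neg_one_le_go text.toList ['?', ' '] text.toList.length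
  unfold list_intro_start aMax hCand
  simp only [List.filterMap_cons, List.filterMap_nil, e1, e2, e3, e4]
  simp only [PySem.List.max?, ne_eq, ite_not]
  split_ifs <;> simp_all [List.foldl]
  all_goals try omega
  all_goals try (split_ifs <;> omega)
  all_goals try (split_ifs <;> simp [Option.getD_some] <;> omega)
  all_goals try (split_ifs <;> simp_all <;> omega)
  all_goals try (split_ifs <;> (try simp) <;> (try split_ifs) <;> (try simp) <;> (try split_ifs) <;> (try simp) <;> (try split_ifs) <;> omega)
  all_goals try simp_all
  all_goals try omega
  all_goals try (split_ifs <;> omega)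
  all_goals try (split_ifs <;> simp_all <;> omega)

theorem hCand_stable (cs tok : List Char) (h2 : tok.length = 2) (j : Nat) (hj : cs.length ≤ j + 2) :
    hCand cs tok (j + 1) = hCand cs tok j := by
  rw [hCand_succ]
  rw [prefix_short tok _ h2 (by simp; omega)]
  simp

theorem go_neg_of_short (cs tok : List Char) (h2 : tok.length = 2) (hs : cs.length < 2) (i : Nat) :
    PySem.Chars.rfind.go cs tok i = -1 := by
  induction i with
  | zero => rw [go_zero, prefix_short tok cs h2 hs]; simp
  | succ n ih =>
    rw [go_succ, prefix_short tok _ h2 (by simp; omega)]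
    simpa using ih

-- ===== VERDICT (by name: the statement is the Claim_ definition above) =====
theorem list_intro_start_spec : Claim_equal_list_intro_start := by
  intro text _
  unfold Spec_list_intro_start list_intro_start_alt
  by_cases hlen : text.toList.length < 2
  · simp only [hlen, if_true]
    rw [listA_eq_aMax]
    unfold aMax hCand
    rw [go_neg_of_short _ _ rfl hlen, go_neg_of_short _ _ rfl hlen,
        go_neg_of_short _ _ rfl hlen, go_neg_of_short _ _ rfl hlen]
    simp
  · simp only [hlen, if_false]
    rw [altGo_eq_aMax, listA_eq_aMax]
    obtain ⟨n, hn⟩ : ∃ n, text.toList.length = n + 2 := ⟨text.toList.length - 2, by omega⟩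
    have hsub : text.toList.length - 2 = n := by omega
    rw [hsub, hn]
    unfold aMax
    rw [hCand_stable _ _ rfl (n + 1) (by omega), hCand_stable _ _ rfl n (by omega),
        hCand_stable _ _ rfl (n + 1) (by omega), hCand_stable _ _ rfl n (by omega),
        hCand_stable _ _ rfl (n + 1) (by omega), hCand_stable _ _ rfl n (by omega),
        hCand_stable _ _ rfl (n + 1) (by omega), hCand_stable _ _ rfl n (by omega)]
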